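-- pv_equiv track=rewrite | github.com/ZWP-FlyZ/AppAlgorithm | src/dynamic_planning/flow_shop.py | flowshop
-- ===== SOURCE A (Python) =====
-- def flowshop(a,b):
--     n = len(a);
--     ns1=[];
--     ns2=[];
--     for i in range(n):
--         if a[i]<b[i]:ns1.append([i,a[i]]);
--         else:ns2.append([i,b[i]]);
--     ns1=sorted(ns1,key=lambda s:s[1]);
--     ns2=sorted(ns2,key=lambda s:s[1],reverse=True);
--     ns1.extend(ns2);
--     c=[s[0] for s in ns1];
--
--     j=a[c[0]];
--     k=j+b[c[0]];
--     for i in range(1,n):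
--         j+=a[c[i]];
--         if j<k:k=k+b[c[i]];
--         else: k=j+b[c[i]];
--     return k,c;
--     pass;
-- ===== SOURCE B (Python) =====
-- def flowshop(a, b):
--     n = len(a)
--     g1 = sorted((i for i in range(n) if a[i] < b[i]), key=lambda i: a[i])
--     g2 = sorted((i for i in range(n) if not a[i] < b[i]), key=lambda i: b[i], reverse=True)
--     c = g1 + g2
--     rsuf = [0]
--     for i in reversed(c):
--         rsuf.append(b[i] + rsuf[-1])
--     suf = rsuf
--     suf.reverse()
--     pref = a[c[0]]
--     best = pref + suf[0]
--     for i, s in zip(c[1:], suf[1:]):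
--         pref += a[i]
--         v = pref + s
--         if v > best:
--             best = v
--     return best, c
-- ===== Notes on version B (the rewrite author's own statement) =====
-- stated objective: alternative
-- what changed: Keeps Johnson's partition-and-sort (restated as two sorts of index lists) but replaces the incremental j/k makespan recurrence with the max-plus closed form: a precomputed suffix-sum list of machine-2 times and a single running max of prefix_a(i)+suffix_b(i).
import Mathlib
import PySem

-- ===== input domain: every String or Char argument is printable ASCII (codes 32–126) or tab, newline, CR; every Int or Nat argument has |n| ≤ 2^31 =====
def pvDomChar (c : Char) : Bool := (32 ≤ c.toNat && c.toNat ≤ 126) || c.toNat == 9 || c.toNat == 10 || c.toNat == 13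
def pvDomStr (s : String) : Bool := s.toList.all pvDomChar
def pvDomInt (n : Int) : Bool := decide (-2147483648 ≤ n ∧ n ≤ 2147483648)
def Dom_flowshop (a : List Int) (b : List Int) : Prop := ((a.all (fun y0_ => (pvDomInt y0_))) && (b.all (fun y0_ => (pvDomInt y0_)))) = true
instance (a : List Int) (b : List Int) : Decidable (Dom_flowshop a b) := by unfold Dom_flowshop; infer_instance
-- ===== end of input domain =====

-- B keeps Johnson's partition-and-sort (as two sorts of index lists) but replaces the
-- incremental j/k makespan recurrence by the max-plus form: makespan = max over positions
-- of (prefix sum of a) + (suffix sum of b), using a precomputed suffix-sum list. Alternative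
-- decomposition, same cost. (Same return value; no argument is mutated by either version.)

-- ===== PORT A =====
def flowshop (a : List Int) (b : List Int) : Int × List Int :=
  let n : Int := a.length
  let st := (PySem.List.pyRange 0 n 1).foldl
    (fun (st : List (Int × Int) × List (Int × Int)) i =>
      if PySem.List.pyGetD a i 0 < PySem.List.pyGetD b i 0 then
        (st.1 ++ [(i, PySem.List.pyGetD a i 0)], st.2)
      else
        (st.1, st.2 ++ [(i, PySem.List.pyGetD b i 0)]))
    ([], [])
  let ns1 := PySem.List.sorted st.1 (fun s => s.2) false
  let ns2 := PySem.List.sorted st.2 (fun s => s.2) true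
  let ns1 := ns1 ++ ns2
  let c := ns1.map (fun s => s.1)
  let j := PySem.List.pyGetD a (PySem.List.pyGetD c 0 0) 0
  let k := j + PySem.List.pyGetD b (PySem.List.pyGetD c 0 0) 0
  let jk := (PySem.List.pyRange 1 n 1).foldl
    (fun (st : Int × Int) i =>
      let j := st.1 + PySem.List.pyGetD a (PySem.List.pyGetD c i 0) 0
      (j, if j < st.2 then st.2 + PySem.List.pyGetD b (PySem.List.pyGetD c i 0) 0
          else j + PySem.List.pyGetD b (PySem.List.pyGetD c i 0) 0))
    (j, k)
  (jk.2, c)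

-- ===== PORT B =====
def flowshop_alt (a : List Int) (b : List Int) : Int × List Int :=
  let n : Int := a.length
  let g1 := PySem.List.sorted
    ((PySem.List.pyRange 0 n 1).filter (fun i => decide (PySem.List.pyGetD a i 0 < PySem.List.pyGetD b i 0)))
    (fun i => PySem.List.pyGetD a i 0) false
  let g2 := PySem.List.sorted
    ((PySem.List.pyRange 0 n 1).filter (fun i => !decide (PySem.List.pyGetD a i 0 < PySem.List.pyGetD b i 0)))
    (fun i => PySem.List.pyGetD b i 0) true
  let c := g1 ++ g2
  let rsuf := c.reverse.foldl
    (fun (rsuf : List Int) i => rsuf ++ [PySem.List.pyGetD b i 0 + PySem.List.pyGetD rsuf (-1) 0]) [0]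
  let suf := rsuf.reverse  -- list.reverse() of a freshly built local list: exact
  let pref := PySem.List.pyGetD a (PySem.List.pyGetD c 0 0) 0
  let best := pref + PySem.List.pyGetD suf 0 0
  let pb := ((PySem.List.slice c (some 1) none).zip (PySem.List.slice suf (some 1) none)).foldl
    (fun (st : Int × Int) is =>
      let pref := st.1 + PySem.List.pyGetD a is.1 0
      let v := pref + is.2
      (pref, if st.2 < v then v else st.2))
    (pref, best)
  (pb.2, c)

-- ===== PRECONDITION & SPEC =====
-- Pre_ excludes exactly the inputs where the Python A raises IndexError: the empty job list
-- (c[0]) and b shorter than a (b[i] inside the partition loop).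
def Pre_flowshop (a : List Int) (b : List Int) : Prop := a ≠ [] ∧ a.length ≤ b.length
instance (a : List Int) (b : List Int) : Decidable (Pre_flowshop a b) := by unfold Pre_flowshop; infer_instance
def pvWitness_flowshop : List Int × List Int := ([3, 1, 2], [2, 4, 2])

def Spec_flowshop (a : List Int) (b : List Int) (out : Int × List Int) : Prop := out = flowshop_alt a b
instance (a : List Int) (b : List Int) (out : Int × List Int) : Decidable (Spec_flowshop a b out) := by unfold Spec_flowshop; infer_instance

-- ===== CLAIM (what is proved, stated in full; the proofs are below) =====
def Claim_equal_flowshop : Prop := ∀ (a : List Int) (b : List Int), Dom_flowshop a b → Pre_flowshop a b → Spec_flowshop a b (flowshop a b)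

-- ===== LEMMAS AND PROOFS =====


def pvSumB (b : List Int) (c : List Int) : Int := (c.map (fun i => PySem.List.pyGetD b i 0)).sum
def pvSuf (b : List Int) (c : List Int) : List Int :=
  c.foldr (fun i s => (PySem.List.pyGetD b i 0 + PySem.List.pyGetD s 0 0) :: s) [0]

lemma pvSuf_head (b c : List Int) : PySem.List.pyGetD (pvSuf b c) 0 0 = pvSumB b c := by
  induction c with
  | nil => simp [pvSuf, pvSumB, PySem.List.pyGetD_zero_cons]
  | cons x r ih => simp [pvSuf, pvSumB, PySem.List.pyGetD_zero_cons] at *; simp [ih]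

lemma pvInsertBy_map {α β : Type} (f : α → β) (bef : β → β → Bool) (x : α) (ys : List α) :
    PySem.List.insertBy bef (f x) (ys.map f)
      = (PySem.List.insertBy (fun u v => bef (f u) (f v)) x ys).map f := by
  induction ys with
  | nil => rfl
  | cons y ys ih =>
      simp only [List.map_cons, PySem.List.insertBy]
      split_ifs with h
      · rfl
      · simp [ih]

lemma pvFoldl_insertBy_map {α β : Type} (f : α → β) (bef : β → β → Bool) :
    ∀ (l : List α) (acc : List α),
    (l.map f).foldl (fun acc x => PySem.List.insertBy bef x acc) (acc.map f)
      = (l.foldl (fun acc x => PySem.List.insertBy (fun u v => bef (f u) (f v)) x acc) acc).map f := by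
  intro l
  induction l with
  | nil => intro acc; rfl
  | cons x r ih =>
      intro acc
      simp only [List.map_cons, List.foldl_cons]
      rw [pvInsertBy_map f bef x acc]
      exact ih _

lemma pvSorted_map {α β κ : Type} [LinearOrder κ] (f : α → β) (key : β → κ) (rev : Bool) (l : List α) :
    PySem.List.sorted (l.map f) key rev = (PySem.List.sorted l (fun x => key (f x)) rev).map f := by
  cases rev with
  | false =>
      rw [PySem.List.sorted_eq_foldl_insertBy, PySem.List.sorted_eq_foldl_insertBy]
      have := pvFoldl_insertBy_map f (fun u v => decide (key u < key v)) l []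
      simpa using this
  | true =>
      rw [PySem.List.sorted_rev_eq_foldl_insertBy, PySem.List.sorted_rev_eq_foldl_insertBy]
      have := pvFoldl_insertBy_map f (fun u v => decide (key v < key u)) l []
      simpa using this

lemma pvPartition (a b : List Int) (n : Int) :
    (PySem.List.pyRange 0 n 1).foldl
      (fun (st : List (Int × Int) × List (Int × Int)) i =>
        if PySem.List.pyGetD a i 0 < PySem.List.pyGetD b i 0 then
          (st.1 ++ [(i, PySem.List.pyGetD a i 0)], st.2)
        else
          (st.1, st.2 ++ [(i, PySem.List.pyGetD b i 0)]))
      ([], [])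
      = (((PySem.List.pyRange 0 n 1).filter
            (fun i => decide (PySem.List.pyGetD a i 0 < PySem.List.pyGetD b i 0))).map
              (fun i => (i, PySem.List.pyGetD a i 0)),
         ((PySem.List.pyRange 0 n 1).filter
            (fun i => !decide (PySem.List.pyGetD a i 0 < PySem.List.pyGetD b i 0))).map
              (fun i => (i, PySem.List.pyGetD b i 0))) := by
  rw [PySem.List.foldl_congr_mem _ _
      (fun (st : List (Int × Int) × List (Int × Int)) i =>
        ((if PySem.List.pyGetD a i 0 < PySem.List.pyGetD b i 0 then st.1 ++ [(i, PySem.List.pyGetD a i 0)] else st.1),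
         (if ¬ PySem.List.pyGetD a i 0 < PySem.List.pyGetD b i 0 then st.2 ++ [(i, PySem.List.pyGetD b i 0)] else st.2)))
      _ (by intro acc x _; split_ifs <;> simp_all)]
  rw [PySem.List.foldl_prod_mk
      (f := fun (s : List (Int × Int)) i =>
        if PySem.List.pyGetD a i 0 < PySem.List.pyGetD b i 0 then s ++ [(i, PySem.List.pyGetD a i 0)] else s)
      (g := fun (s : List (Int × Int)) i =>
        if ¬ PySem.List.pyGetD a i 0 < PySem.List.pyGetD b i 0 then s ++ [(i, PySem.List.pyGetD b i 0)] else s)]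
  rw [PySem.List.foldl_append_ite, PySem.List.foldl_append_ite]
  refine Prod.ext (by simp) ?_
  simp only [List.nil_append]
  congr 1
  apply List.filter_congr
  intro x _
  simp only [← decide_not]

lemma pvMain (a b : List Int) : ∀ (l : List Int) (j k : Int),
    ((l.zip (pvSuf b l)).foldl
      (fun (st : Int × Int) is =>
        (st.1 + PySem.List.pyGetD a is.1 0,
          if st.2 < st.1 + PySem.List.pyGetD a is.1 0 + is.2 then st.1 + PySem.List.pyGetD a is.1 0 + is.2 else st.2))
      (j, k + pvSumB b l)).2
    = (l.foldl
      (fun (st : Int × Int) x =>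
        (st.1 + PySem.List.pyGetD a x 0,
          if st.1 + PySem.List.pyGetD a x 0 < st.2 then st.2 + PySem.List.pyGetD b x 0
          else st.1 + PySem.List.pyGetD a x 0 + PySem.List.pyGetD b x 0))
      (j, k)).2 := by
  intro l
  induction l with
  | nil => intro j k; simp [pvSumB]
  | cons x r ih =>
      intro j k
      have hsuf : pvSuf b (x :: r) = (PySem.List.pyGetD b x 0 + pvSumB b r) :: pvSuf b r := by
        have := pvSuf_head b r
        simp only [pvSuf, List.foldr_cons] at *
        rw [this]
      rw [hsuf]
      simp only [List.zip_cons_cons, List.foldl_cons]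
      have hstep :
          ((j + PySem.List.pyGetD a x 0 : Int),
            if (k + pvSumB b (x :: r) : Int) < j + PySem.List.pyGetD a x 0 + (PySem.List.pyGetD b x 0 + pvSumB b r)
            then j + PySem.List.pyGetD a x 0 + (PySem.List.pyGetD b x 0 + pvSumB b r) else k + pvSumB b (x :: r))
          = (j + PySem.List.pyGetD a x 0,
            (if (j + PySem.List.pyGetD a x 0 : Int) < k then k + PySem.List.pyGetD b x 0
             else j + PySem.List.pyGetD a x 0 + PySem.List.pyGetD b x 0) + pvSumB b r) := by
        have hs : pvSumB b (x :: r) = PySem.List.pyGetD b x 0 + pvSumB b r := by simp [pvSumB]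
        rw [hs]
        split_ifs <;> (refine Prod.ext rfl ?_) <;> simp <;> omega
      rw [hstep]
      exact ih _ _

lemma pvSuf_ne_nil (b c : List Int) : pvSuf b c ≠ [] := by
  cases c <;> simp [pvSuf]

lemma pvGetD_reverse_neg_one (l : List Int) (h : l ≠ []) :
    PySem.List.pyGetD l.reverse (-1) 0 = PySem.List.pyGetD l 0 0 := by
  obtain ⟨x, t, rfl⟩ := List.exists_cons_of_ne_nil h
  rw [List.reverse_cons, PySem.List.pyGetD_neg_one_append_singleton, PySem.List.pyGetD_zero_cons]

lemma pvRsuf (b c : List Int) :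
    c.reverse.foldl (fun (s : List Int) i => s ++ [PySem.List.pyGetD b i 0 + PySem.List.pyGetD s (-1) 0]) [0]
      = (pvSuf b c).reverse := by
  induction c with
  | nil => rfl
  | cons x r ih =>
      rw [List.reverse_cons, List.foldl_append, ih, List.foldl_cons, List.foldl_nil]
      rw [pvGetD_reverse_neg_one _ (pvSuf_ne_nil b r)]
      have : pvSuf b (x :: r) = (PySem.List.pyGetD b x 0 + PySem.List.pyGetD (pvSuf b r) 0 0) :: pvSuf b r := by
        simp [pvSuf]
      rw [this, List.reverse_cons]

lemma pvMakespan (a b c : List Int) (hc : c ≠ []) (hlen : c.length = a.length) :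
    ((PySem.List.pyRange 1 (a.length : Int) 1).foldl
      (fun (st : Int × Int) i =>
        (st.1 + PySem.List.pyGetD a (PySem.List.pyGetD c i 0) 0,
          if st.1 + PySem.List.pyGetD a (PySem.List.pyGetD c i 0) 0 < st.2 then
            st.2 + PySem.List.pyGetD b (PySem.List.pyGetD c i 0) 0
          else st.1 + PySem.List.pyGetD a (PySem.List.pyGetD c i 0) 0 + PySem.List.pyGetD b (PySem.List.pyGetD c i 0) 0))
      (PySem.List.pyGetD a (PySem.List.pyGetD c 0 0) 0,
       PySem.List.pyGetD a (PySem.List.pyGetD c 0 0) 0 + PySem.List.pyGetD b (PySem.List.pyGetD c 0 0) 0)).2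
    =
    (((PySem.List.slice c (some 1) none).zip
        (PySem.List.slice ((c.reverse.foldl (fun (s : List Int) i => s ++ [PySem.List.pyGetD b i 0 + PySem.List.pyGetD s (-1) 0]) [0]).reverse) (some 1) none)).foldl
      (fun (st : Int × Int) is =>
        (st.1 + PySem.List.pyGetD a is.1 0,
          if st.2 < st.1 + PySem.List.pyGetD a is.1 0 + is.2 then st.1 + PySem.List.pyGetD a is.1 0 + is.2 else st.2))
      (PySem.List.pyGetD a (PySem.List.pyGetD c 0 0) 0,
       PySem.List.pyGetD a (PySem.List.pyGetD c 0 0) 0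
         + PySem.List.pyGetD ((c.reverse.foldl (fun (s : List Int) i => s ++ [PySem.List.pyGetD b i 0 + PySem.List.pyGetD s (-1) 0]) [0]).reverse) 0 0)).2 := by
  have hsufdef : (c.reverse.foldl
      (fun (s : List Int) i => s ++ [PySem.List.pyGetD b i 0 + PySem.List.pyGetD s (-1) 0]) [0]).reverse
      = pvSuf b c := by
    rw [pvRsuf, List.reverse_reverse]
  rw [hsufdef]
  have hcast : (a.length : Int) = (c.length : Int) := by rw [hlen]
  rw [hcast]
  rw [PySem.List.foldl_pyRange_pyGetD' c 0
      (f := fun (st : Int × Int) x =>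
        (st.1 + PySem.List.pyGetD a x 0,
          if st.1 + PySem.List.pyGetD a x 0 < st.2 then st.2 + PySem.List.pyGetD b x 0
          else st.1 + PySem.List.pyGetD a x 0 + PySem.List.pyGetD b x 0))
      _ (by norm_num)]
  obtain ⟨x, r, rfl⟩ := List.exists_cons_of_ne_nil hc
  rw [PySem.List.slice_from_one, PySem.List.slice_from_one]
  have hsufcons : pvSuf b (x :: r) = (PySem.List.pyGetD b x 0 + pvSumB b r) :: pvSuf b r := by
    have := pvSuf_head b r
    simp only [pvSuf, List.foldr_cons] at *
    rw [this]
  rw [hsufcons]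
  simp only [List.tail_cons, PySem.List.pyGetD_zero_cons, Int.toNat_one, List.drop_succ_cons,
    List.drop_zero]
  rw [← add_assoc]
  exact (pvMain a b r _ _).symm


lemma pvOrder (a b : List Int) :
    ((PySem.List.sorted (((PySem.List.pyRange 0 ((a.length : Int)) 1).filter
        (fun i => decide (PySem.List.pyGetD a i 0 < PySem.List.pyGetD b i 0))).map
          (fun i => (i, PySem.List.pyGetD a i 0))) (fun s => s.2) false
      ++ PySem.List.sorted (((PySem.List.pyRange 0 ((a.length : Int)) 1).filter
        (fun i => !decide (PySem.List.pyGetD a i 0 < PySem.List.pyGetD b i 0))).map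
          (fun i => (i, PySem.List.pyGetD b i 0))) (fun s => s.2) true).map (fun s => s.1))
    = PySem.List.sorted ((PySem.List.pyRange 0 ((a.length : Int)) 1).filter
        (fun i => decide (PySem.List.pyGetD a i 0 < PySem.List.pyGetD b i 0)))
        (fun i => PySem.List.pyGetD a i 0) false
      ++ PySem.List.sorted ((PySem.List.pyRange 0 ((a.length : Int)) 1).filter
        (fun i => !decide (PySem.List.pyGetD a i 0 < PySem.List.pyGetD b i 0)))
        (fun i => PySem.List.pyGetD b i 0) true := by
  rw [List.map_append, pvSorted_map, pvSorted_map]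
  simp [List.map_map, Function.comp_def]

lemma pvCLen (a b : List Int) :
    (PySem.List.sorted ((PySem.List.pyRange 0 ((a.length : Int)) 1).filter
        (fun i => decide (PySem.List.pyGetD a i 0 < PySem.List.pyGetD b i 0)))
        (fun i => PySem.List.pyGetD a i 0) false
      ++ PySem.List.sorted ((PySem.List.pyRange 0 ((a.length : Int)) 1).filter
        (fun i => !decide (PySem.List.pyGetD a i 0 < PySem.List.pyGetD b i 0)))
        (fun i => PySem.List.pyGetD b i 0) true).length = a.length := by
  rw [List.length_append, PySem.List.length_sorted, PySem.List.length_sorted]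
  have h := (List.filter_append_perm
    (fun i => decide (PySem.List.pyGetD a i 0 < PySem.List.pyGetD b i 0))
    (PySem.List.pyRange 0 ((a.length : Int)) 1)).length_eq
  rw [List.length_append] at h
  rw [h, PySem.List.length_pyRange_one]
  simp

lemma pvEq (a b : List Int) (ha : a ≠ []) : flowshop a b = flowshop_alt a b := by
  simp only [flowshop, flowshop_alt]
  rw [pvPartition a b ((a.length : Int))]
  simp only []
  rw [pvOrder a b]
  have hc : PySem.List.sorted ((PySem.List.pyRange 0 ((a.length : Int)) 1).filter
        (fun i => decide (PySem.List.pyGetD a i 0 < PySem.List.pyGetD b i 0)))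
        (fun i => PySem.List.pyGetD a i 0) false
      ++ PySem.List.sorted ((PySem.List.pyRange 0 ((a.length : Int)) 1).filter
        (fun i => !decide (PySem.List.pyGetD a i 0 < PySem.List.pyGetD b i 0)))
        (fun i => PySem.List.pyGetD b i 0) true ≠ [] := by
    intro h
    have := pvCLen a b
    rw [h] at this
    simp at this
    exact ha (List.eq_nil_of_length_eq_zero this.symm)
  refine Prod.ext ?_ rfl
  exact pvMakespan a b _ hc (pvCLen a b)

-- ===== VERDICT (by name: the statement is the Claim_ definition above) =====
theorem flowshop_spec : Claim_equal_flowshop := by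
  intro a b _ hpre
  unfold Spec_flowshop
  exact pvEq a b hpre.1
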